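-- pv_equiv track=rewrite | github.com/saifmodan2006/Learning_platform | smart-learning-system/modules/revision.py | _create_exam_revision
-- ===== SOURCE A (Python) =====
-- def _create_exam_revision(modules):
--     """Exam-focused revision plan"""
--     revision = "🎯 EXAM-FOCUSED REVISION PLAN\n" + "="*50 + "\n\n"
--     revision += "Perfect for: Before certifications or technical tests\n\n"
--
--     revision += "PRIORITY ORDER:\n"
--     revision += "-"*30 + "\n"
--
--     # Sort by priority
--     critical = [m for m in modules if m.get('priority') == 'CRITICAL']
--     high = [m for m in modules if m.get('priority') == 'HIGH']
--     medium = [m for m in modules if m.get('priority') == 'MEDIUM']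
--
--     revision += "\n🔴 CRITICAL (Must Know - 60% of time):\n"
--     for module in critical:
--         revision += f"  ✓ {module['title']}\n"
--
--     revision += "\n🟠 HIGH PRIORITY (Should Know - 30% of time):\n"
--     for module in high:
--         revision += f"  ✓ {module['title']}\n"
--
--     revision += "\n🟡 MEDIUM (Nice to Know - 10% of time):\n"
--     for module in medium:
--         revision += f"  ✓ {module['title']}\n"
--
--     revision += "\n\nEXAM STRATEGY:\n"
--     revision += "-"*30 + "\n"
--     revision += "1. Start with questions you know\n"
--     revision += "2. Mark difficult ones and return later\n"
--     revision += "3. Manage time: Don't spend too long on one question\n"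
--     revision += "4. Read questions carefully\n"
--     revision += "5. Review answers if time permits\n"
--
--     return revision
-- ===== SOURCE B (Python) =====
-- def _create_exam_revision(modules):
--     """Exam-focused revision plan (single pass: section texts accumulated per priority)"""
--     crit = high = med = ""
--     for m in modules:
--         p = m.get('priority')
--         if p == 'CRITICAL':
--             crit += f"  ✓ {m['title']}\n"
--         elif p == 'HIGH':
--             high += f"  ✓ {m['title']}\n"
--         elif p == 'MEDIUM':
--             med += f"  ✓ {m['title']}\n"
--     return (
--         "🎯 EXAM-FOCUSED REVISION PLAN\n" + "="*50 + "\n\n"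
--         "Perfect for: Before certifications or technical tests\n\n"
--         "PRIORITY ORDER:\n" + "-"*30 + "\n"
--         "\n🔴 CRITICAL (Must Know - 60% of time):\n" + crit +
--         "\n🟠 HIGH PRIORITY (Should Know - 30% of time):\n" + high +
--         "\n🟡 MEDIUM (Nice to Know - 10% of time):\n" + med +
--         "\n\nEXAM STRATEGY:\n" + "-"*30 + "\n"
--         "1. Start with questions you know\n"
--         "2. Mark difficult ones and return later\n"
--         "3. Manage time: Don't spend too long on one question\n"
--         "4. Read questions carefully\n"
--         "5. Review answers if time permits\n"
--     )
-- ===== Notes on version B (the rewrite author's own statement) =====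
-- stated objective: simpler
-- what changed: B replaces A's three filter comprehensions plus three per-section output loops with a single pass over modules that accumulates the three section texts directly (one string per priority), then returns one fixed-format concatenation with no output loops at all.
import Mathlib
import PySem

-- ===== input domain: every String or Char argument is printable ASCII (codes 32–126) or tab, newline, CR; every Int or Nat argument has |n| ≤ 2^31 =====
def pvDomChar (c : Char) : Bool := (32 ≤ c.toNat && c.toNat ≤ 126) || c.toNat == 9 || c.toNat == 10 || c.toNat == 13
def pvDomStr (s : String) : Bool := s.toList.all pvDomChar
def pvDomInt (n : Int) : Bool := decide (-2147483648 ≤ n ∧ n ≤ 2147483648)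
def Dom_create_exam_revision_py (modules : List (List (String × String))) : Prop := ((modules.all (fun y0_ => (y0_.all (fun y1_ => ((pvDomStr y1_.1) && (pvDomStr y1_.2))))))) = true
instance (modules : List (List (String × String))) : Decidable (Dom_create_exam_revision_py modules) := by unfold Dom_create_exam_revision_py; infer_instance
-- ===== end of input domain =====

-- B builds the three priority sections in one pass over `modules` (A makes three filter passes plus three output loops); return values proved equal on Pre_.


-- shared primitive helpers: m.get(k) (first match) and the per-module line "  ✓ {m['title']}\n"
-- (m['title'] raises KeyError when absent; Pre_ excludes that, so the total getD "" form is exact on Pre_)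
def pvGet (m : List (String × String)) (k : String) : Option String :=
  (PySem.Dict.mk m).get? k

def pvLine (m : List (String × String)) : String :=
  "  ✓ " ++ (pvGet m "title").getD "" ++ "\n"

-- ===== PORT A =====
def create_exam_revision_py (modules : List (List (String × String))) : String :=
  let revision := "🎯 EXAM-FOCUSED REVISION PLAN\n" ++ String.ofList (List.replicate 50 '=') ++ "\n\n"
  let revision := revision ++ "Perfect for: Before certifications or technical tests\n\n"
  let revision := revision ++ "PRIORITY ORDER:\n"
  let revision := revision ++ String.ofList (List.replicate 30 '-') ++ "\n"
  let critical := modules.filter (fun m => pvGet m "priority" == some "CRITICAL")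
  let high := modules.filter (fun m => pvGet m "priority" == some "HIGH")
  let medium := modules.filter (fun m => pvGet m "priority" == some "MEDIUM")
  let revision := critical.foldl (fun r m => r ++ pvLine m)
      (revision ++ "\n🔴 CRITICAL (Must Know - 60% of time):\n")
  let revision := high.foldl (fun r m => r ++ pvLine m)
      (revision ++ "\n🟠 HIGH PRIORITY (Should Know - 30% of time):\n")
  let revision := medium.foldl (fun r m => r ++ pvLine m)
      (revision ++ "\n🟡 MEDIUM (Nice to Know - 10% of time):\n")
  let revision := revision ++ "\n\nEXAM STRATEGY:\n"
  let revision := revision ++ String.ofList (List.replicate 30 '-') ++ "\n"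
  let revision := revision ++ "1. Start with questions you know\n"
  let revision := revision ++ "2. Mark difficult ones and return later\n"
  let revision := revision ++ "3. Manage time: Don't spend too long on one question\n"
  let revision := revision ++ "4. Read questions carefully\n"
  let revision := revision ++ "5. Review answers if time permits\n"
  revision

-- ===== PORT B =====
-- single pass: the three section texts (crit, high, med) accumulated together
def pvBuckets (modules : List (List (String × String))) : String × String × String :=
  modules.foldl (fun s m =>
    match pvGet m "priority" with
    | some "CRITICAL" => (s.1 ++ pvLine m, s.2.1, s.2.2)
    | some "HIGH"     => (s.1, s.2.1 ++ pvLine m, s.2.2)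
    | some "MEDIUM"   => (s.1, s.2.1, s.2.2 ++ pvLine m)
    | _               => s) ("", "", "")

def create_exam_revision_py_alt (modules : List (List (String × String))) : String :=
  let b := pvBuckets modules
  "🎯 EXAM-FOCUSED REVISION PLAN\n" ++ String.ofList (List.replicate 50 '=') ++ "\n\n" ++
  "Perfect for: Before certifications or technical tests\n\n" ++
  "PRIORITY ORDER:\n" ++ String.ofList (List.replicate 30 '-') ++ "\n" ++
  "\n🔴 CRITICAL (Must Know - 60% of time):\n" ++ b.1 ++
  "\n🟠 HIGH PRIORITY (Should Know - 30% of time):\n" ++ b.2.1 ++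
  "\n🟡 MEDIUM (Nice to Know - 10% of time):\n" ++ b.2.2 ++
  "\n\nEXAM STRATEGY:\n" ++ String.ofList (List.replicate 30 '-') ++ "\n" ++
  "1. Start with questions you know\n" ++
  "2. Mark difficult ones and return later\n" ++
  "3. Manage time: Don't spend too long on one question\n" ++
  "4. Read questions carefully\n" ++
  "5. Review answers if time permits\n"

-- ===== PRECONDITION & SPEC =====
-- Pre_ excludes exactly the inputs where A raises KeyError: a module whose 'priority' is
-- CRITICAL/HIGH/MEDIUM but which has no 'title' key.
def Pre_create_exam_revision_py (modules : List (List (String × String))) : Prop :=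
  (modules.all (fun m =>
    match pvGet m "priority" with
    | some p => if p == "CRITICAL" || p == "HIGH" || p == "MEDIUM" then (pvGet m "title").isSome else true
    | none => true)) = true
instance (modules : List (List (String × String))) : Decidable (Pre_create_exam_revision_py modules) := by
  unfold Pre_create_exam_revision_py; infer_instance

def pvWitness_create_exam_revision_py : (List (List (String × String))) :=
  [[("priority", "CRITICAL"), ("title", "Intro")], [("priority", "LOW")]]

def Spec_create_exam_revision_py (modules : List (List (String × String))) (out : String) : Prop := out = create_exam_revision_py_alt modules
instance (modules : List (List (String × String))) (out : String) : Decidable (Spec_create_exam_revision_py modules out) := by unfold Spec_create_exam_revision_py; infer_instance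

-- ===== CLAIM (what is proved, stated in full; the proofs are below) =====
def Claim_equal_create_exam_revision_py : Prop := ∀ (modules : List (List (String × String))), Dom_create_exam_revision_py modules → Pre_create_exam_revision_py modules → Spec_create_exam_revision_py modules (create_exam_revision_py modules)

-- ===== LEMMAS AND PROOFS =====

-- section text of a list of modules (what each of A's output loops appends)
def pvSec (xs : List (List (String × String))) : String :=
  xs.foldl (fun r m => r ++ pvLine m) ""

theorem pvSec_out (xs : List (List (String × String))) (init : String) :
    xs.foldl (fun r m => r ++ pvLine m) init = init ++ pvSec xs := by
  induction xs generalizing init with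
  | nil => simp [pvSec]
  | cons m t ih =>
    simp only [pvSec, List.foldl_cons]
    rw [ih, ih ("" ++ pvLine m), String.append_assoc]
    simp

theorem pvSec_cons (m : List (String × String)) (l : List (List (String × String))) :
    pvSec (m :: l) = pvLine m ++ pvSec l := by
  simp only [pvSec, List.foldl_cons]
  rw [pvSec_out]; congr 1

theorem pvBuckets_filter (modules : List (List (String × String))) :
    pvBuckets modules =
      (pvSec (modules.filter (fun m => pvGet m "priority" == some "CRITICAL")),
       pvSec (modules.filter (fun m => pvGet m "priority" == some "HIGH")),
       pvSec (modules.filter (fun m => pvGet m "priority" == some "MEDIUM"))) := by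
  suffices h : ∀ (xs : List (List (String × String))) (a b c : String),
      xs.foldl (fun s m =>
        match pvGet m "priority" with
        | some "CRITICAL" => (s.1 ++ pvLine m, s.2.1, s.2.2)
        | some "HIGH"     => (s.1, s.2.1 ++ pvLine m, s.2.2)
        | some "MEDIUM"   => (s.1, s.2.1, s.2.2 ++ pvLine m)
        | _               => s) (a, b, c) =
      (a ++ pvSec (xs.filter (fun m => pvGet m "priority" == some "CRITICAL")),
       b ++ pvSec (xs.filter (fun m => pvGet m "priority" == some "HIGH")),
       c ++ pvSec (xs.filter (fun m => pvGet m "priority" == some "MEDIUM"))) by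
    simpa [pvBuckets] using h modules "" "" ""
  intro xs
  induction xs with
  | nil => intro a b c; simp [pvSec]
  | cons m t ih =>
    intro a b c
    simp only [List.foldl_cons, List.filter_cons]
    cases hp : pvGet m "priority" with
    | none => simp [ih]
    | some p =>
      by_cases h1 : p = "CRITICAL"
      · subst h1; simp [ih, pvSec_cons, String.append_assoc]
      · by_cases h2 : p = "HIGH"
        · subst h2; simp [ih, pvSec_cons, String.append_assoc]
        · by_cases h3 : p = "MEDIUM"
          · subst h3; simp [ih, pvSec_cons, String.append_assoc]
          · have : (match (some p : Option String) with
              | some "CRITICAL" => ((a, b, c).1 ++ pvLine m, (a, b, c).2.1, (a, b, c).2.2)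
              | some "HIGH"     => ((a, b, c).1, (a, b, c).2.1 ++ pvLine m, (a, b, c).2.2)
              | some "MEDIUM"   => ((a, b, c).1, (a, b, c).2.1, (a, b, c).2.2 ++ pvLine m)
              | _               => (a, b, c)) = (a, b, c) := by
              simp only []
              split <;> simp_all
            simp [ih, h1, h2, h3]

-- ===== VERDICT (by name: the statement is the Claim_ definition above) =====
theorem create_exam_revision_py_spec : Claim_equal_create_exam_revision_py := by
  intro modules _ _
  unfold Spec_create_exam_revision_py create_exam_revision_py create_exam_revision_py_alt
  rw [pvBuckets_filter]
  simp only [pvSec_out, String.append_assoc]
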